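-- pv_equiv track=rewrite | github.com/REDxEYE/Pillow | src/PIL/VtfImagePlugin.py | _get_mipmap_count
-- ===== SOURCE A (Python) =====
-- def _get_mipmap_count(width: int, height: int):
--     mip_count = 1
--     while True:
--         mip_width = width >> mip_count
--         mip_height = height >> mip_count
--         if mip_width == 0 and mip_height == 0:
--             return mip_count
--         mip_count += 1
-- ===== SOURCE B (Python) =====
-- def _get_mipmap_count(width: int, height: int):
--     # closed form: smallest k >= 1 with width >> k == 0 == height >> k
--     return max(1, width.bit_length(), height.bit_length())
-- ===== Notes on version B (the rewrite author's own statement) =====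
-- stated objective: simpler
-- what changed: Replaces the shift-until-zero while-loop by the closed form max(1, width.bit_length(), height.bit_length()), since x >> k == 0 exactly when k >= x.bit_length().
-- outside the precondition, e.g. on _get_mipmap_count(-1, 4): A does not finish within the time limit, B returns 3
import Mathlib
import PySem

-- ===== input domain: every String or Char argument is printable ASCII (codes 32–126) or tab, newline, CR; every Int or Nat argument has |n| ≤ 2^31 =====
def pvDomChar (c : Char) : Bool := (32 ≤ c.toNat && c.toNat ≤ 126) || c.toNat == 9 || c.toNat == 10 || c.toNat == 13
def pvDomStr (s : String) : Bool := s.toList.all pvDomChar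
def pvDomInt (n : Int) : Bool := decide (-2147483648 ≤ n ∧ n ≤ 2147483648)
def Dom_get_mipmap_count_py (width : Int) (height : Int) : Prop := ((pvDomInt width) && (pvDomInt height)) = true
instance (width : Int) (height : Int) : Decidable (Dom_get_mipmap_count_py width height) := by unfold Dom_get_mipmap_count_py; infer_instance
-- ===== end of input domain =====

-- B replaces A's shift-until-zero while-loop by the closed form
-- max(1, width.bit_length(), height.bit_length()); return values only (no mutation).

-- ===== PORT A =====
-- A's `while True` loop, with a fuel guard only to make it total in Lean: within
-- Pre_ (nonnegative dimensions, |n| ≤ 2^31 from Dom) the loop returns within 33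
-- iterations, so fuel 64 is never exhausted and the guard changes nothing.
-- `mip_count.toNat` is exact: the counter starts at 1 and only increases.
def getMipmapLoopA (width height : Int) (fuel : Nat) (mip_count : Int) : Int :=
  match fuel with
  | 0 => mip_count
  | fuel + 1 =>
    let mip_width := width >>> mip_count.toNat
    let mip_height := height >>> mip_count.toNat
    if mip_width = 0 ∧ mip_height = 0 then mip_count
    else getMipmapLoopA width height fuel (mip_count + 1)

def get_mipmap_count_py (width : Int) (height : Int) : Int :=
  getMipmapLoopA width height 64 1

-- ===== PORT B =====
-- Python's n.bit_length() on our nonnegative domain is Nat.size of the absolute value.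
def get_mipmap_count_py_alt (width : Int) (height : Int) : Int :=
  max 1 (max (width.natAbs.size : Int) (height.natAbs.size : Int))

-- ===== PRECONDITION & SPEC =====
-- Pre_ excludes negative dimensions: there A's loop never terminates (x >> k
-- stays -1 forever), so A returns on exactly the inputs Pre_ admits.
def Pre_get_mipmap_count_py (width : Int) (height : Int) : Prop :=
  0 ≤ width ∧ 0 ≤ height
instance (width : Int) (height : Int) : Decidable (Pre_get_mipmap_count_py width height) := by
  unfold Pre_get_mipmap_count_py; infer_instance

def pvWitness_get_mipmap_count_py : Int × Int := (256, 128)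

def Spec_get_mipmap_count_py (width : Int) (height : Int) (out : Int) : Prop := out = get_mipmap_count_py_alt width height
instance (width : Int) (height : Int) (out : Int) : Decidable (Spec_get_mipmap_count_py width height out) := by unfold Spec_get_mipmap_count_py; infer_instance

-- ===== CLAIM (what is proved, stated in full; the proofs are below) =====
def Claim_equal_get_mipmap_count_py : Prop := ∀ (width : Int) (height : Int), Dom_get_mipmap_count_py width height → Pre_get_mipmap_count_py width height → Spec_get_mipmap_count_py width height (get_mipmap_count_py width height)

-- ===== LEMMAS AND PROOFS =====

-- the stopping test of A's loop, on naturals: both shifts vanish iff the counter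
-- has reached both bit lengths
lemma shift_zero_iff (n k : Nat) : ((n : Int) >>> k = 0) ↔ Nat.size n ≤ k := by
  have h : ((n : Int) >>> k) = ((n >>> k : Nat) : Int) := rfl
  rw [h, Nat.shiftRight_eq_div_pow]
  rw [Int.natCast_eq_zero, Nat.div_eq_zero_iff, ← Nat.size_le]
  have : 2 ^ k ≠ 0 := by positivity
  omega

lemma loopA_eq (wn hn : Nat) :
    ∀ (fuel mip : Nat), 1 ≤ mip → mip ≤ max 1 (max wn.size hn.size) →
      max 1 (max wn.size hn.size) - mip < fuel →
      getMipmapLoopA (wn : Int) (hn : Int) fuel (mip : Int)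
        = (max 1 (max wn.size hn.size) : Nat) := by
  intro fuel
  induction fuel with
  | zero => intro mip _ _ hf; omega
  | succ fuel ih =>
    intro mip h1 hle hf
    unfold getMipmapLoopA
    have ht : ((mip : Int)).toNat = mip := Int.toNat_natCast mip
    rw [ht]
    by_cases hstop : Nat.size wn ≤ mip ∧ Nat.size hn ≤ mip
    · have hmip : max 1 (max wn.size hn.size) = mip := by omega
      simp [shift_zero_iff, hstop, hmip]
    · have hcond : ¬ ((wn : Int) >>> mip = 0 ∧ (hn : Int) >>> mip = 0) := by
        simp [shift_zero_iff]; omega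
      simp only [hcond, if_false]
      have : ((mip : Int) + 1) = ((mip + 1 : Nat) : Int) := by push_cast; ring
      rw [this]
      exact ih (mip + 1) (by omega) (by omega) (by omega)

lemma size_le_32 (n : Nat) (h : n ≤ 2147483648) : Nat.size n ≤ 32 := by
  rw [Nat.size_le]
  calc n ≤ 2147483648 := h
    _ < 2 ^ 32 := by norm_num

-- ===== VERDICT (by name: the statement is the Claim_ definition above) =====
theorem get_mipmap_count_py_spec : Claim_equal_get_mipmap_count_py := by
  intro width height hdom hpre
  obtain ⟨hw, hh⟩ := hpre
  unfold Dom_get_mipmap_count_py pvDomInt at hdom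
  simp only [Bool.and_eq_true, decide_eq_true_eq] at hdom
  unfold Spec_get_mipmap_count_py get_mipmap_count_py get_mipmap_count_py_alt
  have hwc : width = ((width.toNat : Nat) : Int) := (Int.toNat_of_nonneg hw).symm
  have hhc : height = ((height.toNat : Nat) : Int) := (Int.toNat_of_nonneg hh).symm
  have hws : Nat.size width.toNat ≤ 32 := size_le_32 _ (by omega)
  have hhs : Nat.size height.toNat ≤ 32 := size_le_32 _ (by omega)
  rw [hwc, hhc]
  have h1 : ((1 : Nat) : Int) = (1 : Int) := rfl
  rw [← h1, loopA_eq width.toNat height.toNat 64 1 (le_refl 1) (by omega) (by omega)]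
  have hwa : ((width.toNat : Int)).natAbs = width.toNat := Int.natAbs_natCast _
  have hha : ((height.toNat : Int)).natAbs = height.toNat := Int.natAbs_natCast _
  rw [hwa, hha]
  push_cast
  rfl
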